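-- pv_equiv track=rewrite | github.com/eden-bs/Robotics | scripts/task7.py | index_of_min_distance
-- ===== SOURCE A (Python) =====
-- def index_of_min_distance(distances):
--     min_dist = float('inf')
--     min_dist_index = -1
--     for i in range(len(distances)):
--         if distances[i] != -1 and distances[i] < min_dist:
--             min_dist = distances[i]
--             min_dist_index = i
--     return min_dist_index
-- ===== SOURCE B (Python) =====
-- def index_of_min_distance(distances):
--     for i, d in sorted(enumerate(distances), key=lambda p: p[1]):
--         if d != -1:
--             return i
--     return -1
-- ===== Notes on version B (the rewrite author's own statement) =====
-- stated objective: alternative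
-- what changed: B stably sorts the enumerated (index, distance) pairs by distance and returns the index of the first pair whose distance is not -1 (stability preserves A's first-occurrence tie-breaking), instead of A's single-pass running-minimum loop.
import Mathlib
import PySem

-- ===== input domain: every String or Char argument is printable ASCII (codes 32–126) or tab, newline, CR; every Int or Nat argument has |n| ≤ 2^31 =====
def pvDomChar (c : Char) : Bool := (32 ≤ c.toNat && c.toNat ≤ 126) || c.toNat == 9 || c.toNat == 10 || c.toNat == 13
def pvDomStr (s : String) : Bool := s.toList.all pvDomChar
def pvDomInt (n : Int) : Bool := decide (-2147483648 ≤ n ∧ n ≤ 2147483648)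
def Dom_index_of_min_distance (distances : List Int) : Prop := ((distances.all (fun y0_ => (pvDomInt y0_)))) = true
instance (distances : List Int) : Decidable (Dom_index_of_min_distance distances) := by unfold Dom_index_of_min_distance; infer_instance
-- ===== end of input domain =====

-- B sorts the enumerated (index, distance) pairs stably by distance and returns the index of the
-- first pair with distance ≠ -1, instead of A's running-minimum loop; alternative algorithm, same result.


-- ===== PORT A =====
-- float('inf') as the initial minimum is modelled by Option Int: none = infinity
-- (every comparison 'd < inf' is true; once assigned, min_dist is the Int itself).
def index_of_min_distance (distances : List Int) : Int :=
  let r := (PySem.List.pyRange 0 distances.length 1).foldl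
    (fun (st : Option Int × Int) i =>
      let d := PySem.List.pyGetD distances i 0
      let ok := match st.1 with | none => true | some m => decide (d < m)
      if d ≠ -1 ∧ ok = true then (some d, i) else st)
    (none, -1)
  r.2

-- ===== PORT B =====
def index_of_min_distance_alt (distances : List Int) : Int :=
  let s := PySem.List.sorted (PySem.List.enumerate distances) (fun p => p.2) false
  match s.find? (fun p => decide (p.2 ≠ -1)) with
  | some p => p.1
  | none => -1

-- ===== PRECONDITION & SPEC =====
def Spec_index_of_min_distance (distances : List Int) (out : Int) : Prop := out = index_of_min_distance_alt distances
instance (distances : List Int) (out : Int) : Decidable (Spec_index_of_min_distance distances out) := by unfold Spec_index_of_min_distance; infer_instance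

-- ===== CLAIM (what is proved, stated in full; the proofs are below) =====
def Claim_equal_index_of_min_distance : Prop := ∀ (distances : List Int), Dom_index_of_min_distance distances → Spec_index_of_min_distance distances (index_of_min_distance distances)

-- ===== LEMMAS AND PROOFS =====

-- The common reduction both programs compute: fold the valid (index, distance) pairs,
-- keeping the first pair of strictly minimal distance.
def pvStep (r : Option (Int × Int)) (p : Int × Int) : Option (Int × Int) :=
  if p.2 = -1 then r
  else match r with
    | none => some p
    | some m => if p.2 < m.2 then some p else some m

-- A's loop state (min_dist : Option Int = none for inf, min_dist_index) viewed through pvStep's accumulator.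
def pvPhi : Option (Int × Int) → Option Int × Int
  | none => (none, -1)
  | some p => (some p.2, p.1)

lemma pvA_loop (l : List (Int × Int)) (acc : Option (Int × Int)) :
    l.foldl
      (fun (st : Option Int × Int) (p : Int × Int) =>
        let d := p.2
        let ok := match st.1 with | none => true | some m => decide (d < m)
        if d ≠ -1 ∧ ok = true then (some d, p.1) else st)
      (pvPhi acc)
    = pvPhi (l.foldl pvStep acc) := by
  induction l generalizing acc with
  | nil => rfl
  | cons p t ih =>
    obtain ⟨i, d⟩ := p
    by_cases hd : d = -1
    · subst hd
      simpa [pvStep] using ih acc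
    · cases acc with
      | none => simpa [hd, pvPhi, pvStep] using ih (some (i, d))
      | some m =>
        obtain ⟨mi, md⟩ := m
        by_cases hlt : d < md
        · simpa [hd, hlt, pvPhi, pvStep] using ih (some (i, d))
        · simpa [hd, hlt, pvPhi, pvStep] using ih (some (mi, md))

-- Inserting one pair into a distance-sorted list and taking the first valid pair
-- is exactly one pvStep on the previous first valid pair.
lemma pv_ins_find (x : Int × Int) (s : List (Int × Int))
    (hs : s.Pairwise (fun a b => a.2 ≤ b.2)) :
    (PySem.List.insertBy (fun a b => decide (a.2 < b.2)) x s).find? (fun p => decide (p.2 ≠ -1))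
    = pvStep (s.find? (fun p => decide (p.2 ≠ -1))) x := by
  induction s with
  | nil =>
    rw [PySem.List.insertBy.eq_1]
    by_cases hx : x.2 = -1 <;> simp [pvStep, hx, List.find?]
  | cons y t ih =>
    rw [PySem.List.insertBy.eq_2]
    have hyt : ∀ z ∈ t, y.2 ≤ z.2 := fun z hz => (List.pairwise_cons.mp hs).1 z hz
    by_cases hb : x.2 < y.2
    · -- x goes in front
      simp only [hb, decide_true, if_true]
      by_cases hx : x.2 = -1
      · -- x invalid: find? skips it
        simp [pvStep, hx, List.find?]
      · by_cases hy : y.2 = -1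
        · -- first valid of (y::t) is find? t; x is strictly below every key of t
          rcases hft : t.find? (fun p => decide (p.2 ≠ -1)) with _ | m
          · have hft' : List.find? (fun p : Int × Int => !decide (p.2 = -1)) t = none := by
              simpa using hft
            simp [pvStep, hx, hy, List.find?, hft']
          · have hft' : List.find? (fun p : Int × Int => !decide (p.2 = -1)) t = some m := by
              simpa using hft
            have hm : m ∈ t := List.mem_of_find?_eq_some hft
            have hxm : x.2 < m.2 := lt_of_lt_of_le hb (hyt m hm)
            simp [pvStep, hx, hy, List.find?, hft', hxm]
        · simp [pvStep, hx, hy, List.find?, hb]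
    · -- x goes after y
      simp only [hb, decide_false, Bool.false_eq_true, if_false]
      by_cases hy : y.2 = -1
      · simp only [List.find?, hy]
        simpa [hy] using ih (List.pairwise_cons.mp hs).2
      · -- y stays the first valid pair, and x is not smaller than it
        have hxy : ¬ x.2 < y.2 := hb
        simp [List.find?, hy, pvStep, hxy]

lemma pv_fold_ins (l : List (Int × Int)) (acc : List (Int × Int))
    (h : acc.Pairwise (fun a b => a.2 ≤ b.2)) :
    (l.foldl (fun acc x => PySem.List.insertBy (fun a b => decide (a.2 < b.2)) x acc) acc).find?
        (fun p => decide (p.2 ≠ -1))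
    = l.foldl pvStep (acc.find? (fun p => decide (p.2 ≠ -1))) := by
  induction l generalizing acc with
  | nil => rfl
  | cons x t ih =>
    have h' := PySem.List.insertBy_pairwise_le (fun p : Int × Int => p.2) x acc h
    simp only [List.foldl_cons]
    rw [ih _ h', pv_ins_find x acc h]

-- ===== VERDICT (by name: the statement is the Claim_ definition above) =====
theorem index_of_min_distance_spec : Claim_equal_index_of_min_distance := by
  intro distances _
  unfold Spec_index_of_min_distance
  simp only [index_of_min_distance, index_of_min_distance_alt]
  rw [PySem.List.sorted_eq_foldl_insertBy, pv_fold_ins _ [] (by simp), List.find?_nil]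
  rw [PySem.List.enumerate_eq_map_pyRange (d := 0)]
  simp only [PySem.List.len_eq]
  rw [List.foldl_map]
  have h := pvA_loop
    ((PySem.List.pyRange 0 (distances.length : Int) 1).map (fun j => (j, PySem.List.pyGetD distances j 0)))
    none
  rw [List.foldl_map] at h
  rw [List.foldl_map] at h
  split
  · rename_i p heq
    rw [heq] at h
    exact congrArg Prod.snd h
  · rename_i heq
    rw [heq] at h
    exact congrArg Prod.snd h
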